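-- pv_equiv track=rewrite | github.com/hawaiianpizz4/proyectoml | funciones.py | presenciaTokensDoc
-- ===== SOURCE A (Python) =====
-- def presenciaTokensDoc(diccionario,documento):
--   #lista de numero (0,1) de tokens que hay en el documento
--   lista = []
--   for tokenDic in diccionario:
--     #numero de tokens que hay en el documento con el token del diccionario
--     n = 0
--     for tokenDoc in documento:
--       #si son iguales se suma n
--       if(tokenDic == tokenDoc):
--         n+=1
--       #si es uno sale del bucle por que ya existe ese token en el documento
--       if(n==1):
--         break
--     lista.append(n)
--   return lista
-- ===== SOURCE B (Python) =====
-- def presenciaTokensDoc(diccionario, documento):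
--     # Inverted traversal: index dictionary tokens by position once, then one pass
--     # over the document marking every position of each seen token.
--     posiciones = {}
--     for i, token in enumerate(diccionario):
--         posiciones[token] = posiciones.get(token, []) + [i]
--     resultado = [0] * len(diccionario)
--     for token in documento:
--         for i in posiciones.get(token, []):
--             resultado[i] = 1
--     return resultado
-- ===== Notes on version B (the rewrite author's own statement) =====
-- stated objective: faster
-- what changed: Instead of scanning the document once per dictionary token (with an early break), B builds a token->positions index of the dictionary once and makes a single pass over the document, marking every position of each seen token in a preallocated 0-vector.
import Mathlib
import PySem

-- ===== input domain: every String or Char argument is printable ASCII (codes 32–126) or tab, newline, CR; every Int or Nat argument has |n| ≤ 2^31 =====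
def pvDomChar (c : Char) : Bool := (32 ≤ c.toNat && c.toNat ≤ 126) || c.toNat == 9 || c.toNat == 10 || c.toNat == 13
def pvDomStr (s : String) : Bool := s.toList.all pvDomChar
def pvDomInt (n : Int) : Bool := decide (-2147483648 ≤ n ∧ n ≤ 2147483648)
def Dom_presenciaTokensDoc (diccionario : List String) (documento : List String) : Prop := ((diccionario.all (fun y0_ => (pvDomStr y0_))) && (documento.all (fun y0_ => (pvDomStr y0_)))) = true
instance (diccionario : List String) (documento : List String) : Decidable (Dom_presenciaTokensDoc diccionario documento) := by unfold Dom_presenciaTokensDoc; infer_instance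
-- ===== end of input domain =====

-- B builds a token -> positions index of the dictionary once and marks positions in a single
-- pass over the document, instead of A's per-token scan of the document (objective: alternative).

-- ===== PORT A =====
-- inner loop of A: scan `documento`, increment on match, break as soon as n == 1
def pvInnerA (tok : String) : List String → Int → Int
  | [], n => n
  | t :: rest, n =>
      let n' := if tok == t then n + 1 else n
      if n' == 1 then n' else pvInnerA tok rest n'

def presenciaTokensDoc (diccionario : List String) (documento : List String) : List Int :=
  diccionario.foldl (fun lista tokenDic => lista ++ [pvInnerA tokenDic documento 0]) []

-- ===== PORT B =====
def presenciaTokensDoc_alt (diccionario : List String) (documento : List String) : List Int :=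
  let posiciones : PySem.Dict String (List Int) :=
    (PySem.List.enumerate diccionario).foldl
      (fun d p => d.modify p.2 [] (fun v => v ++ [p.1])) PySem.Dict.empty
  documento.foldl
    (fun resultado token =>
      (posiciones.getD token []).foldl (fun r i => r.set i.toNat 1) resultado)
    (List.replicate diccionario.length 0)

-- ===== PRECONDITION & SPEC =====
def Spec_presenciaTokensDoc (diccionario : List String) (documento : List String) (out : List Int) : Prop := out = presenciaTokensDoc_alt diccionario documento
instance (diccionario : List String) (documento : List String) (out : List Int) : Decidable (Spec_presenciaTokensDoc diccionario documento out) := by unfold Spec_presenciaTokensDoc; infer_instance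

-- ===== CLAIM (what is proved, stated in full; the proofs are below) =====
def Claim_equal_presenciaTokensDoc : Prop := ∀ (diccionario : List String) (documento : List String), Dom_presenciaTokensDoc diccionario documento → Spec_presenciaTokensDoc diccionario documento (presenciaTokensDoc diccionario documento)

-- ===== LEMMAS AND PROOFS =====

-- A's inner loop computes presence (0/1)
theorem pvInnerA_eq (tok : String) (doc : List String) :
    pvInnerA tok doc 0 = if doc.contains tok then 1 else 0 := by
  induction doc with
  | nil => simp [pvInnerA]
  | cons t rest ih =>
      simp only [pvInnerA, List.contains_cons]
      by_cases h : tok == t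
      · simp [h]
      · simp only [h, Bool.false_or]
        simpa using ih

theorem A_eq_map (dic doc : List String) :
    presenciaTokensDoc dic doc = dic.map (fun tok => if doc.contains tok then (1:Int) else 0) := by
  unfold presenciaTokensDoc
  rw [PySem.List.foldl_append_singleton_eq_map]
  simp [pvInnerA_eq]

-- the positions B's index stores under key t
def posList (dic : List String) (t : String) : List Int :=
  ((PySem.List.enumerate dic).filter (fun p => p.2 == t)).map (fun p => p.1)

theorem pos_getD_gen (l : List (Int × String)) (d : PySem.Dict String (List Int)) (t : String) :
    (l.foldl (fun d p => d.modify p.2 [] (fun v => v ++ [p.1])) d).getD t []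
    = d.getD t [] ++ ((l.filter (fun p => p.2 == t)).map (fun p => p.1)) := by
  have h : l.foldl (fun d p => d.modify p.2 [] (fun v => v ++ [p.1])) d
      = (l.map Prod.swap).foldl (fun d p => d.modify p.1 [] (fun v => v ++ [p.2])) d := by
    rw [List.foldl_map]; rfl
  rw [h, PySem.Dict.getD_foldl_modify_append]
  simp only [List.filter_map, List.map_map]
  rfl

theorem mem_enum_iff (xs : List String) (s i : Int) (x : String) :
    (i, x) ∈ PySem.List.enumerate xs s ↔ s ≤ i ∧ xs[(i - s).toNat]? = some x := by
  induction xs generalizing s with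
  | nil => simp [PySem.List.enumerate_nil]
  | cons y ys ih =>
      rw [PySem.List.enumerate_cons]
      simp only [List.mem_cons, Prod.mk.injEq, ih (s+1)]
      constructor
      · rintro (⟨rfl, rfl⟩ | ⟨h1, h2⟩)
        · simp
        · refine ⟨by omega, ?_⟩
          have : (i - s).toNat = (i - (s+1)).toNat + 1 := by omega
          simp [this, h2]
      · rintro ⟨h1, h2⟩
        by_cases he : i = s
        · subst he; simp at h2; left; exact ⟨rfl, h2.symm⟩
        · right
          refine ⟨by omega, ?_⟩
          have : (i - s).toNat = (i - (s+1)).toNat + 1 := by omega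
          rw [this] at h2; simpa using h2

theorem mem_posList (dic : List String) (t : String) (j : Nat) :
    (↑j : Int) ∈ posList dic t ↔ dic[j]? = some t := by
  simp only [posList, List.mem_map, List.mem_filter]
  constructor
  · rintro ⟨⟨a, x⟩, ⟨hmem, hx⟩, heq⟩
    simp only [beq_iff_eq] at hx
    simp only at heq
    subst hx; subst heq
    have := (mem_enum_iff dic 0 _ _).1 hmem
    simpa using this.2
  · intro h
    refine ⟨(↑j, t), ⟨?_, by simp⟩, rfl⟩
    exact (mem_enum_iff dic 0 ↑j t).2 ⟨by positivity, by simpa using h⟩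

theorem posList_nonneg (dic : List String) (t : String) : ∀ i ∈ posList dic t, 0 ≤ i := by
  intro i hi
  simp only [posList, List.mem_map, List.mem_filter] at hi
  obtain ⟨⟨a, x⟩, ⟨hmem, _⟩, rfl⟩ := hi
  exact ((mem_enum_iff dic 0 a x).1 hmem).1

-- the inner marking loop, element by element
theorem mark_getElem? (l : List Int) (hl : ∀ i ∈ l, 0 ≤ i) (r : List Int) (j : Nat) :
    (l.foldl (fun r i => r.set i.toNat 1) r)[j]? =
      if (↑j : Int) ∈ l ∧ j < r.length then some 1 else r[j]? := by
  induction l generalizing r with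
  | nil => simp
  | cons i l ih =>
      have hi : 0 ≤ i := hl i (by simp)
      have hl' : ∀ i ∈ l, 0 ≤ i := fun i h => hl i (by simp [h])
      simp only [List.foldl_cons]
      rw [ih hl' (r.set i.toNat 1), List.length_set]
      by_cases hm : (↑j : Int) ∈ l
      · by_cases hj : j < r.length
        · simp [hm, hj, List.mem_cons]
        · simp [hm, hj]
      · by_cases hij : i = ↑j
        · subst hij
          by_cases hj : j < r.length
          · simp [hm, hj]
          · simp [hm, hj]
        · have h2 : ¬ ((↑j:Int) = i) := fun h => hij h.symm
          have h3 : i.toNat ≠ j := by omega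
          simp [hm, h2, h3]

-- marking all positions of t in a map of dic lifts the function at t
theorem mark_map (dic : List String) (t : String) (f : String → Int) :
    (posList dic t).foldl (fun r i => r.set i.toNat 1) (dic.map f)
    = dic.map (fun tok => if tok == t then 1 else f tok) := by
  apply List.ext_getElem?
  intro j
  rw [mark_getElem? _ (posList_nonneg dic t)]
  by_cases hj : j < dic.length
  · have h1 : (dic.map f).length = dic.length := by simp
    obtain ⟨tok, htok⟩ : ∃ tok, dic[j]? = some tok := ⟨dic[j], by simp [hj]⟩
    by_cases he : tok = t
    · subst he
      simp [mem_posList, hj, h1]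
      split <;> rfl
    · simp [mem_posList, List.getElem?_map, htok, he]
  · have h2 : ¬ ((↑j:Int) ∈ posList dic t ∧ j < (dic.map f).length) := by
      rintro ⟨_, h⟩; simp at h; omega
    rw [if_neg h2]
    rw [List.getElem?_eq_none (by simpa using (by omega : dic.length ≤ j)),
        List.getElem?_eq_none (by simpa using (by omega : dic.length ≤ j))]

theorem B_fold (dic : List String) (doc : List String) (f : String → Int) :
    doc.foldl (fun r t => (posList dic t).foldl (fun r i => r.set i.toNat 1) r) (dic.map f)
    = dic.map (fun tok => if doc.contains tok then 1 else f tok) := by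
  induction doc generalizing f with
  | nil => simp
  | cons t doc ih =>
      simp only [List.foldl_cons]
      rw [mark_map, ih]
      apply List.map_congr_left
      intro tok _
      by_cases h : tok = t <;> simp [h]

theorem B_eq_map (dic doc : List String) :
    presenciaTokensDoc_alt dic doc = dic.map (fun tok => if doc.contains tok then (1:Int) else 0) := by
  unfold presenciaTokensDoc_alt
  have hpos : ∀ t : String,
      ((PySem.List.enumerate dic).foldl
        (fun d p => d.modify p.2 [] (fun v => v ++ [p.1])) PySem.Dict.empty).getD t []
      = posList dic t := by
    intro t
    rw [pos_getD_gen]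
    simp [posList]
  simp only [hpos]
  have hrep : List.replicate dic.length (0:Int) = dic.map (fun _ => 0) := by
    simp
  rw [hrep, B_fold]

-- ===== VERDICT (by name: the statement is the Claim_ definition above) =====
theorem presenciaTokensDoc_spec : Claim_equal_presenciaTokensDoc := by
  intro dic doc _
  unfold Spec_presenciaTokensDoc
  rw [A_eq_map, B_eq_map]
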